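-- pv_equiv track=rewrite | github.com/OrcustD/UnifiedBall | preprocess_extract_frames.py | build_match_rounds
-- ===== SOURCE A (Python) =====
-- def build_match_rounds(video_names):
--     matches = {}
--     match_idxs = 1
--     match_to_idxs = {}
--     for video_name in video_names:
--         match_name = '_'.join(video_name.split('_')[:-1])
--         if match_name not in matches:
--             matches[match_name] = []
--         if match_name not in match_to_idxs:
--             match_to_idxs[match_name] = f'match{match_idxs}'
--             match_idxs += 1
--         matches[match_name].append(video_name)
--     # matches = dict(sorted(matches.items(), key=lambda item: len(item[1]), reverse=False))
--     return matches, match_to_idxs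
-- ===== SOURCE B (Python) =====
-- def build_match_rounds(video_names):
--     prefixes = ['_'.join(v.split('_')[:-1]) for v in video_names]
--     keys = list(dict.fromkeys(prefixes))
--     matches = {k: [v for v, p in zip(video_names, prefixes) if p == k] for k in keys}
--     match_to_idxs = {k: f'match{i}' for i, k in enumerate(keys, 1)}
--     return matches, match_to_idxs
-- ===== Notes on version B (the rewrite author's own statement) =====
-- stated objective: alternative
-- what changed: A builds both dicts incrementally in one interleaved loop over the videos with an explicit counter and membership guards; B never builds a dict incrementally: it computes the prefix list, dedups it to get the ordered key list, and then constructs each group by a separate filtering scan of the videos per key (nested scans, O(k*n)) and the index map by enumerating the keys.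
import Mathlib
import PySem

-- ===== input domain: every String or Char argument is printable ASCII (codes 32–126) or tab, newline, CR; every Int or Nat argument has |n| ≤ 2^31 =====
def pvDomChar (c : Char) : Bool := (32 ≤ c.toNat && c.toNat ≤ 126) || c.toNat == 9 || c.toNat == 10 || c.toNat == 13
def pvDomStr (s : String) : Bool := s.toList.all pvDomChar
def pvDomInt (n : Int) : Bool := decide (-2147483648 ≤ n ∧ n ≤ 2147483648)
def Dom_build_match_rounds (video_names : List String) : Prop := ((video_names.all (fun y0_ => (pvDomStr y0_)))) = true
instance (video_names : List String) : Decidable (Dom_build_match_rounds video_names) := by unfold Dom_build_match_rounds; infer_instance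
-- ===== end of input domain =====

-- B replaces A's single interleaved dict-building loop (counter + membership guards) by staged
-- passes: dedup the prefix list to the ordered keys, then one filtering scan per key; objective:
-- alternative (same result, different traversal). No speed claim.

-- shared pure helper: '_'.join(video_name.split('_')[:-1])  (each Python computes this expression)
def pvMatchName (video_name : String) : String :=
  PySem.Str.join "_" (PySem.List.slice ((PySem.Str.split? video_name "_").getD []) none (some (-1)))

-- f'match{i}'
def pvIdxName (i : Int) : String := PySem.Str.join "" ["match", PySem.Int.toStr i]

-- ===== PORT A =====
-- the body of A's for-loop, one iteration over the state (matches, match_idxs, match_to_idxs)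
def pvStepA (st : PySem.Dict String (List String) × Int × PySem.Dict String String)
    (video_name : String) : PySem.Dict String (List String) × Int × PySem.Dict String String :=
  let ms := st.1
  let match_idxs := st.2.1
  let match_to_idxs := st.2.2
  let match_name := pvMatchName video_name
  let ms := if ms.contains match_name then ms else ms.insert match_name []
  let p : Int × PySem.Dict String String :=
    if match_to_idxs.contains match_name then (match_idxs, match_to_idxs)
    else (match_idxs + 1, match_to_idxs.insert match_name (pvIdxName match_idxs))
  let ms := ms.insert match_name (ms.getD match_name [] ++ [video_name])
  (ms, p.1, p.2)

def build_match_rounds (video_names : List String) : (List (String × List String)) × (List (String × String)) :=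
  let st := video_names.foldl pvStepA (PySem.Dict.empty, 1, PySem.Dict.empty)
  (st.1.items, st.2.2.items)

-- ===== PORT B =====
def build_match_rounds_alt (video_names : List String) : (List (String × List String)) × (List (String × String)) :=
  let prefixes := video_names.map pvMatchName
  let keys := PySem.List.dedup prefixes
  let groups := keys.map (fun k =>
    (k, ((video_names.zip prefixes).filter (fun vp => vp.2 == k)).map (·.1)))
  let match_to_idxs := (PySem.List.enumerate keys 1).map (fun p => (p.2, pvIdxName p.1))
  (groups, match_to_idxs)

-- ===== PRECONDITION & SPEC =====
def Spec_build_match_rounds (video_names : List String) (out : (List (String × List String)) × (List (String × String))) : Prop := out = build_match_rounds_alt video_names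
instance (video_names : List String) (out : (List (String × List String)) × (List (String × String))) : Decidable (Spec_build_match_rounds video_names out) := by unfold Spec_build_match_rounds; infer_instance

-- ===== CLAIM (what is proved, stated in full; the proofs are below) =====
def Claim_equal_build_match_rounds : Prop := ∀ (video_names : List String), Dom_build_match_rounds video_names → Spec_build_match_rounds video_names (build_match_rounds video_names)

-- ===== LEMMAS AND PROOFS =====

-- A's matches update (insert [] if missing, then append) as a single Dict.modify
def pvStepM (d : PySem.Dict String (List String)) (v : String) : PySem.Dict String (List String) :=
  d.modify (pvMatchName v) [] (· ++ [v])

-- B's index items derived from a key list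
def pvIdxItems (ks : List String) : List (String × String) :=
  (PySem.List.enumerate ks 1).map (fun p => (p.2, pvIdxName p.1))

lemma pvIdxItems_append (ks : List String) (k : String) :
    pvIdxItems (ks ++ [k]) = pvIdxItems ks ++ [(k, pvIdxName (ks.length + 1))] := by
  simp [pvIdxItems, PySem.List.enumerate_append, PySem.List.enumerate_cons,
        PySem.List.enumerate_nil, add_comm]

lemma pvStepM_nodup (m : PySem.Dict String (List String)) (v : String)
    (hnd : m.keys.Nodup) : (pvStepM m v).keys.Nodup := by
  simpa [pvStepM, PySem.Dict.modify] using PySem.Dict.nodup_keys_insert m _ _ hnd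

-- one A-iteration from a related state is one matches-update (plus the matching index update)
lemma pvStepA_eq_of_contains (m : PySem.Dict String (List String)) (t : PySem.Dict String String)
    (v : String) (hkt : t.contains (pvMatchName v) = m.contains (pvMatchName v))
    (hc : m.contains (pvMatchName v) = true) :
    pvStepA (m, (m.size : Int) + 1, t) v = (pvStepM m v, ((pvStepM m v).size : Int) + 1, t) := by
  simp [pvStepA, pvStepM, hkt, hc, PySem.Dict.modify, PySem.Dict.size_insert]

lemma pvStepA_eq_of_fresh (m : PySem.Dict String (List String)) (t : PySem.Dict String String)
    (v : String) (hkt : t.contains (pvMatchName v) = m.contains (pvMatchName v))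
    (hc : m.contains (pvMatchName v) = false) :
    pvStepA (m, (m.size : Int) + 1, t) v
      = (pvStepM m v, ((pvStepM m v).size : Int) + 1,
         t.insert (pvMatchName v) (pvIdxName ((m.size : Int) + 1))) := by
  simp [pvStepA, pvStepM, hkt, hc, PySem.Dict.modify,
        PySem.Dict.insert_insert_self, PySem.Dict.getD_insert_self,
        PySem.Dict.getD_of_not_contains, PySem.Dict.size_insert]

-- the keys of the index dict track the keys of the grouping dict
lemma pvKeys_of_items (t : PySem.Dict String String) (ks : List String)
    (ht : t.items = pvIdxItems ks) : t.keys = ks := by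
  simp [PySem.Dict.keys, ht, pvIdxItems, List.map_map, Function.comp_def,
        PySem.List.map_snd_enumerate]

-- A's loop, run from a related state, ends in a state determined by the matches-only loop
lemma pvLoop (vs : List String) (m : PySem.Dict String (List String)) (t : PySem.Dict String String)
    (hnd : m.keys.Nodup) (ht : t.items = pvIdxItems m.keys) :
    vs.foldl pvStepA (m, (m.size : Int) + 1, t)
      = (vs.foldl pvStepM m, ((vs.foldl pvStepM m).size : Int) + 1,
         PySem.Dict.mk (pvIdxItems (vs.foldl pvStepM m).keys)) := by
  induction vs generalizing m t with
  | nil =>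
      simp only [List.foldl_nil]
      have : t = PySem.Dict.mk (pvIdxItems m.keys) := by
        apply PySem.Dict.ext; simpa using ht
      rw [this]
  | cons v vs ih =>
      simp only [List.foldl_cons]
      have hkt : t.contains (pvMatchName v) = m.contains (pvMatchName v) := by
        classical
        rw [PySem.Dict.contains_eq_decide_mem_keys, PySem.Dict.contains_eq_decide_mem_keys,
            pvKeys_of_items t m.keys ht]
      by_cases hc : m.contains (pvMatchName v) = true
      · rw [pvStepA_eq_of_contains m t v hkt hc]
        exact ih (pvStepM m v) t (pvStepM_nodup m v hnd)
          (by rw [ht]; congr 1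
              simp [pvStepM, PySem.Dict.modify, PySem.Dict.keys_insert_of_contains m _ hc])
      · have hc' : m.contains (pvMatchName v) = false := by simpa using hc
        rw [pvStepA_eq_of_fresh m t v hkt hc']
        refine ih (pvStepM m v) _ (pvStepM_nodup m v hnd) ?_
        have hkeys : (pvStepM m v).keys = m.keys ++ [pvMatchName v] := by
          simp [pvStepM, PySem.Dict.modify, PySem.Dict.keys_insert_of_not_contains m _ hc']
        have hlen : m.keys.length = m.size := by simp [PySem.Dict.keys, PySem.Dict.size]
        rw [PySem.Dict.items_insert_of_not_contains t _ (by rw [hkt]; exact hc'),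
            hkeys, pvIdxItems_append, ht, hlen]

-- B's per-key zip-filter scan picks out exactly the pairs the modify-loop appended
lemma pvZipFilter (vs : List String) (k : String) :
    ((vs.zip (vs.map pvMatchName)).filter (fun vp => vp.2 == k)).map (·.1)
      = ((vs.map (fun v => (pvMatchName v, v))).filter (fun p => p.1 == k)).map (·.2) := by
  induction vs with
  | nil => simp
  | cons v vs ih =>
      by_cases h : pvMatchName v = k <;> simp [h, ih]

-- ===== VERDICT (by name: the statement is the Claim_ definition above) =====
theorem build_match_rounds_spec : Claim_equal_build_match_rounds := by
  intro vs _
  unfold Spec_build_match_rounds build_match_rounds build_match_rounds_alt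
  have h := pvLoop vs PySem.Dict.empty PySem.Dict.empty
    (by simp [PySem.Dict.keys, PySem.Dict.empty])
    (by simp [PySem.Dict.empty, pvIdxItems, PySem.List.enumerate_nil])
  simp only [PySem.Dict.empty, PySem.Dict.size, List.length_nil, Nat.cast_zero, zero_add] at h
  dsimp only
  simp only [PySem.Dict.empty] at *
  rw [h]
  set M := vs.foldl pvStepM (PySem.Dict.mk []) with hM
  have hnd : M.keys.Nodup := by
    have := PySem.Dict.nodup_keys_foldl_modify_key vs pvMatchName [] (fun _ v => (· ++ [v]))
      (PySem.Dict.mk []) (by simp [PySem.Dict.keys])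
    simpa [pvStepM, hM] using this
  have hkeys : M.keys = PySem.List.dedup (vs.map pvMatchName) := by
    rw [hM]
    show (List.foldl (fun d v => d.modify (pvMatchName v) [] (· ++ [v])) (PySem.Dict.mk []) vs).keys = _
    rw [PySem.Dict.keys_foldl_modify_key]
    simp [PySem.Dict.keys, PySem.Set.update_nil_left]
  simp only [Prod.mk.injEq]
  refine ⟨?_, ?_⟩
  · -- matches component
    rw [PySem.Dict.items_eq_map_keys M hnd [], hkeys]
    refine List.map_congr_left (fun k hk => ?_)
    congr 1
    rw [pvZipFilter]
    have hfold : M = (vs.map (fun v => (pvMatchName v, v))).foldl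
        (fun d p => d.modify p.1 [] (· ++ [p.2])) (PySem.Dict.mk []) := by
      rw [hM, List.foldl_map]; rfl
    rw [hfold, PySem.Dict.getD_foldl_modify_append]
    simp [PySem.Dict.getD, PySem.Dict.get?]
  · -- match_to_idxs component
    rw [hkeys]; rfl
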